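-- pv_equiv track=rewrite | github.com/8ana4nam1ni0n/advent-of-code | 2023/day-11/solution.py | get_galaxies_coordinates
-- ===== SOURCE A (Python) =====
-- from typing import TypeAlias
--
-- Grid: TypeAlias = list[list[str]]
--
-- def get_galaxies_coordinates(universe: Grid, expand_idx, expansion_factor=2):
--     galaxies = []
--     for i, row in enumerate(universe):
--         for j, col in enumerate(row):
--             if col == '#':
--                 rows_to_expand = len([x for x in expand_idx['row'] if i > x])
--                 cols_to_expand = len([x for x in expand_idx['col'] if j > x])
--                 galaxies.append((abs(i + rows_to_expand * (expansion_factor - 1)), abs(j + cols_to_expand * (expansion_factor - 1))))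
--
--     return galaxies
-- ===== SOURCE B (Python) =====
-- def _prefix(values, n):
--     """pre[i] = number of x in values with x < i, for i in range(n)."""
--     cnt = {}
--     below = 0
--     for x in values:
--         if x < 0:
--             below += 1
--         else:
--             cnt[x] = cnt.get(x, 0) + 1
--     pre = []
--     acc = below
--     for i in range(n):
--         pre.append(acc)
--         acc += cnt.get(i, 0)
--     return pre
--
--
-- def get_galaxies_coordinates(universe, expand_idx, expansion_factor=2):
--     positions = [(i, j) for i, row in enumerate(universe)
--                  for j, col in enumerate(row) if col == '#']
--     if not positions:
--         return []
--     k = expansion_factor - 1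
--     rpre = _prefix(expand_idx['row'], len(universe))
--     width = max((len(row) for row in universe), default=0)
--     cpre = _prefix(expand_idx['col'], width)
--     return [(abs(i + rpre[i] * k), abs(j + cpre[j] * k)) for i, j in positions]
-- ===== Notes on version B (the rewrite author's own statement) =====
-- stated objective: alternative
-- what changed: Replaces the per-galaxy linear scan of expand_idx with one counting pass plus cumulative prefix arrays over row/column indices, so each galaxy does an O(1) table lookup instead of re-filtering expand_idx.
import Mathlib
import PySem

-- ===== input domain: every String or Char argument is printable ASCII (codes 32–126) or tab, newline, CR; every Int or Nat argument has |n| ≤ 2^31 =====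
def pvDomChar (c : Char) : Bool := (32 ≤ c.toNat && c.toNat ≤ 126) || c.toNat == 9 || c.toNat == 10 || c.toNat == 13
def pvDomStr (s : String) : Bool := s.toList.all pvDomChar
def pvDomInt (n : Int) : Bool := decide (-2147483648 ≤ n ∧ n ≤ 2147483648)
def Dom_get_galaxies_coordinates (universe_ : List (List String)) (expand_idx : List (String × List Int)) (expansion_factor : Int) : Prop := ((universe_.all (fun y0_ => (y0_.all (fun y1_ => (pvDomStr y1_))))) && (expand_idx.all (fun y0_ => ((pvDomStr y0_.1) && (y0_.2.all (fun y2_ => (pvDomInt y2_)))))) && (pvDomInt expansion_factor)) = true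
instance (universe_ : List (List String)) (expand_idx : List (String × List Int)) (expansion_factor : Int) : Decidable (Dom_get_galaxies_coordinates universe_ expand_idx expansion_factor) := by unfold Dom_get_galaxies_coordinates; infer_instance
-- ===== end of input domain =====

-- B replaces A's per-galaxy filtering scans of expand_idx by one counting pass plus cumulative
-- prefix arrays over row/column indices, looked up per galaxy: objective = alternative algorithm.

-- ===== PORT A =====
def get_galaxies_coordinates (universe_ : List (List String)) (expand_idx : List (String × List Int)) (expansion_factor : Int) : List (Int × Int) :=
  (PySem.List.enumerate universe_ 0).foldl (fun galaxies p =>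
    (PySem.List.enumerate p.2 0).foldl (fun galaxies q =>
      if q.2 == "#" then
        let rows_to_expand : Int := (((PySem.Dict.mk expand_idx).getD "row" []).filter (fun x => decide (p.1 > x))).length
        let cols_to_expand : Int := (((PySem.Dict.mk expand_idx).getD "col" []).filter (fun x => decide (q.1 > x))).length
        galaxies ++ [(|p.1 + rows_to_expand * (expansion_factor - 1)|, |q.1 + cols_to_expand * (expansion_factor - 1)|)]
      else galaxies) galaxies) []

-- ===== PORT B =====
-- helper `_prefix(values, n)`: result[i] = number of x in values with x < i, for i in range(n);
-- one counting pass (dict counter + below-zero tally), then one cumulative pass over range(n)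
def pvPrefix (values : List Int) (n : Int) : List Int :=
  let cb := values.foldl (fun s x =>
      if x < 0 then (s.1, s.2 + 1)
      else (s.1.insert x (s.1.getD x 0 + 1), s.2))
    ((PySem.Dict.empty : PySem.Dict Int Int), (0 : Int))
  ((PySem.List.pyRange 0 n 1).foldl
      (fun s i => (s.1 ++ [s.2], s.2 + cb.1.getD i 0))
      (([] : List Int), cb.2)).1

def get_galaxies_coordinates_alt (universe_ : List (List String)) (expand_idx : List (String × List Int)) (expansion_factor : Int) : List (Int × Int) :=
  let positions := (PySem.List.enumerate universe_ 0).flatMap (fun p =>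
    (PySem.List.enumerate p.2 0).filterMap (fun q => if q.2 == "#" then some (p.1, q.1) else none))
  if positions.isEmpty then []
  else
    let k := expansion_factor - 1
    let rpre := pvPrefix ((PySem.Dict.mk expand_idx).getD "row" []) (universe_.length : Int)
    let width := PySem.List.maxD (universe_.map (fun row => (row.length : Int))) (fun x => x) 0
    let cpre := pvPrefix ((PySem.Dict.mk expand_idx).getD "col" []) width
    positions.map (fun g => (|g.1 + (PySem.List.pyGetD rpre g.1 0) * k|, |g.2 + (PySem.List.pyGetD cpre g.2 0) * k|))

-- ===== PRECONDITION & SPEC =====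
-- Pre_ excludes inputs where some grid cell is '#' but expand_idx lacks a 'row' or 'col' key:
-- there both Pythons raise KeyError (A inside its loop, B when building the prefix arrays).
def Pre_get_galaxies_coordinates (universe_ : List (List String)) (expand_idx : List (String × List Int)) (expansion_factor : Int) : Prop :=
  (∃ row ∈ universe_, "#" ∈ row) →
    (((PySem.Dict.mk expand_idx).get? "row").isSome = true ∧ ((PySem.Dict.mk expand_idx).get? "col").isSome = true)
instance (universe_ : List (List String)) (expand_idx : List (String × List Int)) (expansion_factor : Int) : Decidable (Pre_get_galaxies_coordinates universe_ expand_idx expansion_factor) := by unfold Pre_get_galaxies_coordinates; infer_instance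
def pvWitness_get_galaxies_coordinates : List (List String) × (List (String × List Int)) × Int := ([["#", "."], [".", "#"]], ([("row", [0]), ("col", [1, -2])], 3))

def Spec_get_galaxies_coordinates (universe_ : List (List String)) (expand_idx : List (String × List Int)) (expansion_factor : Int) (out : List (Int × Int)) : Prop := out = get_galaxies_coordinates_alt universe_ expand_idx expansion_factor
instance (universe_ : List (List String)) (expand_idx : List (String × List Int)) (expansion_factor : Int) (out : List (Int × Int)) : Decidable (Spec_get_galaxies_coordinates universe_ expand_idx expansion_factor out) := by unfold Spec_get_galaxies_coordinates; infer_instance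

-- ===== CLAIM (what is proved, stated in full; the proofs are below) =====
def Claim_equal_get_galaxies_coordinates : Prop := ∀ (universe_ : List (List String)) (expand_idx : List (String × List Int)) (expansion_factor : Int), Dom_get_galaxies_coordinates universe_ expand_idx expansion_factor → Pre_get_galaxies_coordinates universe_ expand_idx expansion_factor → Spec_get_galaxies_coordinates universe_ expand_idx expansion_factor (get_galaxies_coordinates universe_ expand_idx expansion_factor)

-- ===== LEMMAS AND PROOFS =====

-- counting x < m+1 splits into x < m plus x = m
theorem pvCountP_lt_succ (l : List Int) (m : Int) :
    l.countP (fun x => decide (x < m + 1)) = l.countP (fun x => decide (x < m)) + l.count m := by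
  induction l with
  | nil => simp
  | cons a t ih =>
    simp only [List.countP_cons, List.count_cons, ih]
    by_cases h1 : a < m + 1 <;> by_cases h2 : a < m <;> by_cases h3 : a = m <;>
      simp [h1, h2, h3] <;> omega

-- the dict built by pvPrefix's counting pass is the multiset of the nonnegative values
theorem pvPrefix_fold_fst_getD (values : List Int) (i : Int) (hi : 0 ≤ i) :
    ((values.foldl (fun s x =>
        if x < 0 then (s.1, s.2 + 1)
        else (s.1.insert x (s.1.getD x 0 + 1), s.2))
      ((PySem.Dict.empty : PySem.Dict Int Int), (0 : Int))).1).getD i 0 = (values.count i : Int) := by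
  have hstep : (fun (s : PySem.Dict Int Int × Int) (x : Int) =>
        if x < 0 then (s.1, s.2 + 1)
        else (s.1.insert x (s.1.getD x 0 + 1), s.2))
      = (fun s x => ((fun (d : PySem.Dict Int Int) (x : Int) => if 0 ≤ x then d.insert x (d.getD x 0 + 1) else d) s.1 x,
                     (fun (b : Int) (x : Int) => if x < 0 then b + 1 else b) s.2 x)) := by
    funext s x; by_cases h : x < 0 <;> simp [h, le_of_not_gt]
  rw [hstep, PySem.List.foldl_prod_mk (f := fun (d : PySem.Dict Int Int) (x : Int) => if 0 ≤ x then d.insert x (d.getD x 0 + 1) else d) (g := fun (b : Int) (x : Int) => if x < 0 then b + 1 else b)]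
  simp only
  rw [PySem.List.foldl_ite_eq_foldl_filter (fun x => 0 ≤ x)]
  rw [PySem.Dict.getD_foldl_insert_add_one]
  rw [List.count_filter (by simp [hi])]
  simp

-- the below-zero tally of pvPrefix's counting pass
theorem pvPrefix_fold_snd (values : List Int) :
    (values.foldl (fun s x =>
        if x < 0 then (s.1, s.2 + 1)
        else (s.1.insert x (s.1.getD x 0 + 1), s.2))
      ((PySem.Dict.empty : PySem.Dict Int Int), (0 : Int))).2
      = (values.countP (fun x => decide (x < 0)) : Int) := by
  have hstep : (fun (s : PySem.Dict Int Int × Int) (x : Int) =>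
        if x < 0 then (s.1, s.2 + 1)
        else (s.1.insert x (s.1.getD x 0 + 1), s.2))
      = (fun s x => ((fun (d : PySem.Dict Int Int) (x : Int) => if 0 ≤ x then d.insert x (d.getD x 0 + 1) else d) s.1 x,
                     (fun (b : Int) (x : Int) => if x < 0 then b + 1 else b) s.2 x)) := by
    funext s x; by_cases h : x < 0 <;> simp [h, le_of_not_gt]
  rw [hstep, PySem.List.foldl_prod_mk (f := fun (d : PySem.Dict Int Int) (x : Int) => if 0 ≤ x then d.insert x (d.getD x 0 + 1) else d) (g := fun (b : Int) (x : Int) => if x < 0 then b + 1 else b)]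
  simp only
  rw [PySem.List.foldl_ite_add_one (fun x => x < 0)]
  simp

-- the cumulative pass turns the counter into the map of strict-lower counts
theorem pvFoldRange (g C : Int → Int) (hC : ∀ k : Nat, C ((k : Int) + 1) = C k + g k) (m : Nat) :
    (PySem.List.pyRange 0 (m : Int) 1).foldl (fun s i => (s.1 ++ [s.2], s.2 + g i)) (([] : List Int), C 0)
      = ((PySem.List.pyRange 0 (m : Int) 1).map C, C m) := by
  induction m with
  | zero => simp [PySem.List.pyRange]
  | succ m ih =>
    have h0 : (0 : Int) ≤ (m : Int) := by positivity
    rw [show ((m + 1 : Nat) : Int) = (m : Int) + 1 by push_cast; ring]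
    rw [PySem.List.pyRange_one_succ_right h0, List.foldl_append, ih, List.map_append]
    simp [hC m]

theorem pvPrefix_eq_map (values : List Int) (m : Nat) :
    pvPrefix values (m : Int)
      = (PySem.List.pyRange 0 (m : Int) 1).map (fun i => (values.countP (fun x => decide (x < i)) : Int)) := by
  unfold pvPrefix
  simp only [pvPrefix_fold_snd]
  rw [pvFoldRange (fun i =>
      ((values.foldl (fun s x =>
          if x < 0 then (s.1, s.2 + 1)
          else (s.1.insert x (s.1.getD x 0 + 1), s.2))
        ((PySem.Dict.empty : PySem.Dict Int Int), (0 : Int))).1).getD i 0)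
    (fun i => (values.countP (fun x => decide (x < i)) : Int))
    (fun k => by
      beta_reduce
      rw [pvPrefix_fold_fst_getD values k (by positivity), pvCountP_lt_succ]
      push_cast; ring) m]

theorem pvPrefix_getD (values : List Int) (n i : Int) (h0 : 0 ≤ i) (hn : i < n) :
    PySem.List.pyGetD (pvPrefix values n) i 0 = (values.countP (fun x => decide (x < i)) : Int) := by
  have h0n : 0 ≤ n := le_trans h0 (le_of_lt hn)
  obtain ⟨m, rfl⟩ : ∃ m : Nat, (m : Int) = n := ⟨n.toNat, Int.toNat_of_nonneg h0n⟩
  rw [pvPrefix_eq_map]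
  exact PySem.List.pyGetD_map_pyRange_of_nonneg _ _ _ _ h0 hn

theorem pvFilterMap_if {α β : Type} (p : α → Bool) (h : α → β) (l : List α) :
    l.filterMap (fun x => if p x then some (h x) else none) = (l.filter p).map h := by
  induction l with
  | nil => simp
  | cons a t ih => by_cases hp : p a <;> simp [hp, ih]

-- the '#'-cell positions both programs enumerate
def pvPositions (universe_ : List (List String)) : List (Int × Int) :=
  (PySem.List.enumerate universe_ 0).flatMap (fun p =>
    (PySem.List.enumerate p.2 0).filterMap (fun q => if q.2 == "#" then some (p.1, q.1) else none))

-- A is the pointwise image of the positions under its per-galaxy scan counts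
theorem pvA_eq_map (universe_ : List (List String)) (expand_idx : List (String × List Int)) (expansion_factor : Int) :
    get_galaxies_coordinates universe_ expand_idx expansion_factor
      = (pvPositions universe_).map (fun g =>
          (|g.1 + ((((PySem.Dict.mk expand_idx).getD "row" []).filter (fun x => decide (g.1 > x))).length : Int) * (expansion_factor - 1)|,
           |g.2 + ((((PySem.Dict.mk expand_idx).getD "col" []).filter (fun x => decide (g.2 > x))).length : Int) * (expansion_factor - 1)|)) := by
  unfold get_galaxies_coordinates pvPositions
  have hinner : ∀ (p : Int × List String) (acc : List (Int × Int)),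
      (PySem.List.enumerate p.2 0).foldl (fun galaxies q =>
        if q.2 == "#" then
          galaxies ++ [(|p.1 + ((((PySem.Dict.mk expand_idx).getD "row" []).filter (fun x => decide (p.1 > x))).length : Int) * (expansion_factor - 1)|,
                        |q.1 + ((((PySem.Dict.mk expand_idx).getD "col" []).filter (fun x => decide (q.1 > x))).length : Int) * (expansion_factor - 1)|)]
        else galaxies) acc
      = acc ++ ((PySem.List.enumerate p.2 0).filter (fun q => q.2 == "#")).map (fun q =>
          (|p.1 + ((((PySem.Dict.mk expand_idx).getD "row" []).filter (fun x => decide (p.1 > x))).length : Int) * (expansion_factor - 1)|,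
           |q.1 + ((((PySem.Dict.mk expand_idx).getD "col" []).filter (fun x => decide (q.1 > x))).length : Int) * (expansion_factor - 1)|)) := by
    intro p acc
    exact PySem.List.foldl_append_if _ _ _ _
  simp only [hinner]
  rw [PySem.List.foldl_append_eq_flatMap]
  simp only [List.nil_append, List.map_flatMap, pvFilterMap_if, List.map_map]
  rfl

-- every enumerated position is in range of both prefix arrays
theorem pvPositions_bounds (universe_ : List (List String)) (g : Int × Int) (hg : g ∈ pvPositions universe_) :
    0 ≤ g.1 ∧ g.1 < (universe_.length : Int) ∧ 0 ≤ g.2 ∧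
      g.2 < PySem.List.maxD (universe_.map (fun row => (row.length : Int))) (fun x => x) 0 := by
  unfold pvPositions at hg
  rw [List.mem_flatMap] at hg
  obtain ⟨p, hp, hgp⟩ := hg
  rw [PySem.List.mem_enumerate_iff] at hp
  obtain ⟨k, hk, rfl⟩ := hp
  rw [List.mem_filterMap] at hgp
  obtain ⟨q, hq, hqg⟩ := hgp
  rw [PySem.List.mem_enumerate_iff] at hq
  obtain ⟨j, hj, rfl⟩ := hq
  have hg' : g = ((k : Int), (j : Int)) := by
    by_cases hc : universe_[k][j] == "#" <;> simp [hc] at hqg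
    exact hqg.symm
  subst hg'
  have hwidth : ((universe_[k].length : Int))
      ≤ PySem.List.maxD (universe_.map (fun row => (row.length : Int))) (fun x => x) 0 := by
    have hmem : ((universe_[k].length : Int)) ∈ universe_.map (fun row => (row.length : Int)) :=
      List.mem_map_of_mem (List.getElem_mem hk)
    rcases hm : PySem.List.max? (universe_.map (fun row => (row.length : Int))) (fun x => x) with _ | m
    · rw [PySem.List.max?_eq_none_iff] at hm
      simp [hm] at hmem
    · have := PySem.List.max?_isMax hm _ hmem
      simpa [PySem.List.maxD, hm] using this
  refine ⟨by positivity, by simp only; exact_mod_cast hk, by positivity, ?_⟩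
  simp only
  calc (j : Int) < (universe_[k].length : Int) := by exact_mod_cast hj
    _ ≤ _ := hwidth

theorem pvMain (universe_ : List (List String)) (expand_idx : List (String × List Int)) (expansion_factor : Int) :
    get_galaxies_coordinates universe_ expand_idx expansion_factor = get_galaxies_coordinates_alt universe_ expand_idx expansion_factor := by
  rw [pvA_eq_map]
  show _ = if (pvPositions universe_).isEmpty then [] else
    (pvPositions universe_).map (fun g =>
      (|g.1 + (PySem.List.pyGetD (pvPrefix ((PySem.Dict.mk expand_idx).getD "row" []) (universe_.length : Int)) g.1 0) * (expansion_factor - 1)|,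
       |g.2 + (PySem.List.pyGetD (pvPrefix ((PySem.Dict.mk expand_idx).getD "col" [])
           (PySem.List.maxD (universe_.map (fun row => (row.length : Int))) (fun x => x) 0)) g.2 0) * (expansion_factor - 1)|))
  by_cases hE : (pvPositions universe_).isEmpty
  · rw [if_pos hE, List.isEmpty_iff.mp hE, List.map_nil]
  · rw [if_neg hE]
    apply List.map_congr_left
    intro g hg
    obtain ⟨h1, h2, h3, h4⟩ := pvPositions_bounds universe_ g hg
    rw [pvPrefix_getD _ _ _ h1 h2, pvPrefix_getD _ _ _ h3 h4]
    simp [List.countP_eq_length_filter]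

-- ===== VERDICT (by name: the statement is the Claim_ definition above) =====
theorem get_galaxies_coordinates_spec : Claim_equal_get_galaxies_coordinates := by
  intro universe_ expand_idx expansion_factor _ _
  unfold Spec_get_galaxies_coordinates
  exact pvMain universe_ expand_idx expansion_factor
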